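-- pv_equiv track=rewrite | github.com/ConceptionComp/slurm-gcp | scripts/suspend.py | truncate_iter
-- ===== SOURCE A (Python) =====
-- def truncate_iter(iterable, max_count):
--     end = "..."
--     _iter = iter(iterable)
--     for i, el in enumerate(_iter, start=1):
--         if i >= max_count:
--             yield end
--             break
--         yield el
-- ===== SOURCE B (Python) =====
-- def truncate_iter(iterable, max_count):
--     xs = list(iterable)
--     n = max_count - 1 if max_count > 1 else 0
--     yield from xs[:n]
--     if len(xs) > n:
--         yield "..."
-- ===== Notes on version B (the rewrite author's own statement) =====
-- stated objective: simpler
-- what changed: Replaces the enumerate loop with an index-test-break by a slice of the first max(max_count-1,0) elements followed by a single length check that appends the '...' sentinel.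
import Mathlib
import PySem

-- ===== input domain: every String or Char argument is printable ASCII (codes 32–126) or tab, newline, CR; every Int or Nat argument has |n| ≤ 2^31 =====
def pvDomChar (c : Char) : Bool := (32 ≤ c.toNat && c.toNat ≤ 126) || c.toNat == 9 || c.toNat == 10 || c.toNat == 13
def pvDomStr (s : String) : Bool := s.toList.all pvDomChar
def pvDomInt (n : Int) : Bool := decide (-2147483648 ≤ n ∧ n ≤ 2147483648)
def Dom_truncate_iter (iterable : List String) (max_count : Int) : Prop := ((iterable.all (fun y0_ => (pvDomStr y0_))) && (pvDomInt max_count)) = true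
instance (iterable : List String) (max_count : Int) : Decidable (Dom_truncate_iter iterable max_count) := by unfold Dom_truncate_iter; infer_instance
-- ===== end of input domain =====

-- B replaces A's enumerate loop (index test + break) by a slice of the first
-- max(max_count-1,0) elements plus a single length check appending the "..."
-- sentinel: a simpler, loop-free decomposition with the same output.


-- ===== PORT A =====
-- the enumerate loop: i counts from 1; at i ≥ max_count yield "..." and break, else yield el
def truncateGoA (max_count : Int) : List String → Int → List String
  | [], _ => []
  | el :: rest, i => if i ≥ max_count then ["..."] else el :: truncateGoA max_count rest (i + 1)

def truncate_iter (iterable : List String) (max_count : Int) : List String :=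
  truncateGoA max_count iterable 1

-- ===== PORT B =====
def truncate_iter_alt (iterable : List String) (max_count : Int) : List String :=
  let n : Int := if max_count > 1 then max_count - 1 else 0
  PySem.List.slice iterable none (some n) ++
    (if (iterable.length : Int) > n then ["..."] else [])

-- ===== PRECONDITION & SPEC =====
def Spec_truncate_iter (iterable : List String) (max_count : Int) (out : List String) : Prop := out = truncate_iter_alt iterable max_count
instance (iterable : List String) (max_count : Int) (out : List String) : Decidable (Spec_truncate_iter iterable max_count out) := by unfold Spec_truncate_iter; infer_instance

-- ===== CLAIM (what is proved, stated in full; the proofs are below) =====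
def Claim_equal_truncate_iter : Prop := ∀ (iterable : List String) (max_count : Int), Dom_truncate_iter iterable max_count → Spec_truncate_iter iterable max_count (truncate_iter iterable max_count)

-- ===== LEMMAS AND PROOFS =====

-- closed form of A's loop: with counter i it emits the first (max_count - i).toNat
-- elements and the sentinel exactly when more elements remain
theorem truncateGoA_eq (max_count : Int) (xs : List String) (i : Int) :
    truncateGoA max_count xs i =
      xs.take (max_count - i).toNat ++
        (if xs.length > (max_count - i).toNat then ["..."] else []) := by
  induction xs generalizing i with
  | nil => simp [truncateGoA]
  | cons el rest ih =>
    by_cases h : i ≥ max_count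
    · have h0 : (max_count - i).toNat = 0 := by omega
      simp [truncateGoA, h, h0]
    · have h1 : (max_count - i).toNat = (max_count - (i + 1)).toNat + 1 := by omega
      simp only [truncateGoA, if_neg h, ih (i + 1), h1, List.take_succ_cons,
        List.length_cons, List.cons_append, Nat.add_lt_add_iff_right]

-- ===== VERDICT (by name: the statement is the Claim_ definition above) =====
theorem truncate_iter_spec : Claim_equal_truncate_iter := by
  intro iterable max_count _
  simp only [Spec_truncate_iter, truncate_iter, truncate_iter_alt]
  rw [truncateGoA_eq]
  by_cases h : max_count > 1
  · rw [if_pos h]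
    obtain ⟨k, hk⟩ := Int.eq_ofNat_of_zero_le (show (0:Int) ≤ max_count - 1 by omega)
    rw [hk, PySem.List.slice_to_natCast]
    simp [Nat.cast_lt]
  · rw [if_neg h]
    have h0 : (max_count - 1).toNat = 0 := by omega
    have hs : PySem.List.slice iterable none (some (0:Int)) = iterable.take 0 := by
      exact_mod_cast PySem.List.slice_to_natCast iterable 0
    rw [h0, hs]
    simp [Nat.cast_pos]
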